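-- pv_equiv track=rewrite | github.com/webersab/relationExtractionPipeline | de_pipeline/nel.py | convert_offsets
-- ===== SOURCE A (Python) =====
-- def convert_offsets(sentence):
--     """
--     Convert character offset to token offset
--     """
--     conv = {}
--     counter = 1
--     for x in range(0,len(sentence)):
--         if sentence[x] == ' ':
--             counter += 1
--         else:
--             conv[x] = counter
--     return conv
-- ===== SOURCE B (Python) =====
-- def convert_offsets(sentence):
--     """
--     Convert character offset to token offset
--     """
--     tok = [1]
--     for c in sentence:
--         tok.append(tok[-1] + (c == ' '))
--     return {x: tok[x] for x, c in enumerate(sentence) if c != ' '}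
-- ===== Notes on version B (the rewrite author's own statement) =====
-- stated objective: alternative
-- what changed: Replaces the inline running counter threaded through one index loop by a two-phase decomposition: first build a prefix table tok[x] = 1 + number of spaces strictly before x, then emit the dict with a filtered comprehension over enumerate(sentence).
import Mathlib
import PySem

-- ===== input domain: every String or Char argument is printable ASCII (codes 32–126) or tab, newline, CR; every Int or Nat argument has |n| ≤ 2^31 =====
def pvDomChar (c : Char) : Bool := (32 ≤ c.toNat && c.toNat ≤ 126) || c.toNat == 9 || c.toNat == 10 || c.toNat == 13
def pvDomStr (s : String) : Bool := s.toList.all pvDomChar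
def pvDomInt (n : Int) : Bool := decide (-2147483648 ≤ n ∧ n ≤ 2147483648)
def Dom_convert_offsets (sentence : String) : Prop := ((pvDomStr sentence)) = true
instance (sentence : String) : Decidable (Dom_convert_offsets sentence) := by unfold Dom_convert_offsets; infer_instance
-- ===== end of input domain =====

-- B replaces the inline running counter by a prefix table tok (spaces strictly before x)
-- plus a filtered comprehension over enumerate; same O(n) cost, different decomposition.

-- ===== PORT A =====
-- one index loop over range(len(sentence)) threading (conv, counter)
def convert_offsets (sentence : String) : List (Int × Int) :=
  (((PySem.List.pyRange 0 (PySem.Str.len sentence) 1).foldl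
      (fun (st : PySem.Dict Int Int × Int) x =>
        if PySem.List.pyGetD sentence.toList x ' ' = ' ' then (st.1, st.2 + 1)
        else (st.1.insert x st.2, st.2))
      (PySem.Dict.empty, 1)).1).items

-- ===== PORT B =====
-- phase 1: tok = [1]; for c in sentence: tok.append(tok[-1] + (c == ' '))
-- phase 2: {x: tok[x] for x, c in enumerate(sentence) if c != ' '}
def convert_offsets_alt (sentence : String) : List (Int × Int) :=
  let tok : List Int := sentence.toList.foldl
    (fun acc c => acc ++ [PySem.List.pyGetD acc (-1) 0 + (if c = ' ' then 1 else 0)]) [1]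
  ((PySem.List.enumerate sentence.toList 0).foldl
      (fun (d : PySem.Dict Int Int) p =>
        if p.2 = ' ' then d else d.insert p.1 (PySem.List.pyGetD tok p.1 0))
      PySem.Dict.empty).items

-- ===== PRECONDITION & SPEC =====
def Spec_convert_offsets (sentence : String) (out : List (Int × Int)) : Prop := out = convert_offsets_alt sentence
instance (sentence : String) (out : List (Int × Int)) : Decidable (Spec_convert_offsets sentence out) := by unfold Spec_convert_offsets; infer_instance

-- ===== CLAIM (what is proved, stated in full; the proofs are below) =====
def Claim_equal_convert_offsets : Prop := ∀ (sentence : String), Dom_convert_offsets sentence → Spec_convert_offsets sentence (convert_offsets sentence)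

-- ===== LEMMAS AND PROOFS =====

-- the common value of both programs: offsets/counters for the suffix cs starting at index i with counter cnt
def specConv (cs : List Char) (i cnt : Int) : List (Int × Int) :=
  match cs with
  | [] => []
  | c :: cs' => if c = ' ' then specConv cs' (i+1) (cnt+1) else (i, cnt) :: specConv cs' (i+1) cnt

-- B's appended tail of the tok list after processing cs with last value t
def tokTail (cs : List Char) (t : Int) : List Int :=
  match cs with
  | [] => []
  | c :: cs' => (t + (if c = ' ' then 1 else 0)) :: tokTail cs' (t + (if c = ' ' then 1 else 0))

theorem tokTail_length (cs : List Char) : ∀ t : Int, (tokTail cs t).length = cs.length := by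
  induction cs with
  | nil => intro t; simp [tokTail]
  | cons c cs ih => intro t; simp [tokTail, ih]

theorem b_tok_fold (cs : List Char) :
    ∀ (acc : List Int) (h : acc ≠ []),
      cs.foldl (fun acc c => acc ++ [PySem.List.pyGetD acc (-1) 0 + (if c = ' ' then 1 else 0)]) acc
        = acc ++ tokTail cs (acc.getLast h) := by
  induction cs with
  | nil => intro acc h; simp [tokTail]
  | cons c cs ih =>
      intro acc h
      have hlast : PySem.List.pyGetD acc (-1) 0 = acc.getLast h := PySem.List.pyGetD_neg_one acc 0 h
      simp only [List.foldl_cons, hlast]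
      rw [ih (acc ++ [acc.getLast h + (if c = ' ' then 1 else 0)]) (by simp)]
      simp [tokTail]

theorem tok_getD (cs : List Char) :
    ∀ (t : Int) (n : Nat), n ≤ cs.length →
      (t :: tokTail cs t).getD n 0 = t + ((cs.take n).count ' ' : Int) := by
  induction cs with
  | nil =>
      intro t n hn
      have h0 : n = 0 := by simpa using hn
      subst h0
      simp
  | cons c cs ih =>
      intro t n hn
      cases n with
      | zero => simp
      | succ n =>
          simp only [tokTail, List.getD_cons_succ, List.take_succ_cons]
          rw [ih _ n (by simpa using hn)]
          by_cases hc : c = ' '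
          · simp [hc]; ring
          · simp [hc]

-- A's loop: fold over range(a, len full) starting from a dict whose keys are all < a
theorem a_loop (full : List Char) (cs : List Char) :
    ∀ (a : Int) (d : PySem.Dict Int Int) (cnt : Int),
      0 ≤ a → cs = full.drop a.toNat → (∀ k ∈ d.keys, k < a) →
      (((PySem.List.pyRange a (full.length : Int) 1).foldl
          (fun (st : PySem.Dict Int Int × Int) x =>
            if PySem.List.pyGetD full x ' ' = ' ' then (st.1, st.2 + 1)
            else (st.1.insert x st.2, st.2))
          (d, cnt)).1).items = d.items ++ specConv cs a cnt := by
  induction cs with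
  | nil =>
      intro a d cnt ha hdrop hkeys
      have hlen : full.length ≤ a.toNat := by
        have := congrArg List.length hdrop
        simp at this; omega
      rw [PySem.List.pyRange_one_eq_nil (by omega)]
      simp [specConv]
  | cons c cs ih =>
      intro a d cnt ha hdrop hkeys
      have hlt : a.toNat < full.length := by
        have := congrArg List.length hdrop
        simp at this; omega
      have hget : full[a.toNat] = c := by
        rw [List.drop_eq_getElem_cons hlt] at hdrop
        exact (List.cons.injEq _ _ _ _ ▸ hdrop).1.symm
      have hdrop' : cs = full.drop ((a + 1).toNat) := by
        rw [List.drop_eq_getElem_cons hlt] at hdrop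
        have : (a + 1).toNat = a.toNat + 1 := by omega
        rw [this]
        exact ((List.cons.injEq _ _ _ _ ▸ hdrop).2)
      have haInt : a < (full.length : Int) := by omega
      rw [PySem.List.pyRange_one_cons haInt]
      simp only [List.foldl_cons]
      rw [PySem.List.pyGetD_eq_getElem full ' ' ha (by omega), hget]
      by_cases hc : c = ' '
      · subst hc
        rw [if_pos rfl]
        rw [ih (a + 1) d (cnt + 1) (by omega) hdrop' (fun k hk => by have := hkeys k hk; omega)]
        simp [specConv]
      · simp only [if_neg hc]
        have hcont : d.contains a = false := by
          rw [PySem.Dict.contains_eq_decide_mem_keys]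
          simp only [decide_eq_false_iff_not]
          intro hmem
          exact absurd (hkeys a hmem) (lt_irrefl a)
        rw [ih (a + 1) (d.insert a cnt) cnt (by omega) hdrop'
              (fun k hk => by
                rcases (PySem.Dict.mem_keys_insert _ _ _ _).mp hk with h | h
                · omega
                · have := hkeys k h; omega)]
        rw [PySem.Dict.items_insert_of_not_contains d cnt hcont]
        simp [specConv, hc]

-- B's dict-comprehension fold, with the counter invariant cnt = 1 + spaces strictly before a
theorem b_loop (full : List Char) (cs : List Char) :
    ∀ (a : Int) (d : PySem.Dict Int Int) (cnt : Int),
      0 ≤ a → cs = full.drop a.toNat → (∀ k ∈ d.keys, k < a) →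
      cnt = 1 + ((full.take a.toNat).count ' ' : Int) →
      ((PySem.List.enumerate cs a).foldl
          (fun (d : PySem.Dict Int Int) p =>
            if p.2 = ' ' then d
            else d.insert p.1 (PySem.List.pyGetD (1 :: tokTail full 1) p.1 0))
          d).items = d.items ++ specConv cs a cnt := by
  induction cs with
  | nil =>
      intro a d cnt _ _ _ _
      simp [PySem.List.enumerate, specConv]
  | cons c cs ih =>
      intro a d cnt ha hdrop hkeys hcnt
      have hlt : a.toNat < full.length := by
        have := congrArg List.length hdrop
        simp at this; omega
      have hget : full[a.toNat] = c := by
        rw [List.drop_eq_getElem_cons hlt] at hdrop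
        exact (List.cons.injEq _ _ _ _ ▸ hdrop).1.symm
      have hdrop' : cs = full.drop ((a + 1).toNat) := by
        rw [List.drop_eq_getElem_cons hlt] at hdrop
        have : (a + 1).toNat = a.toNat + 1 := by omega
        rw [this]
        exact ((List.cons.injEq _ _ _ _ ▸ hdrop).2)
      have htake : ((full.take ((a+1).toNat)).count ' ' : Int)
          = ((full.take a.toNat).count ' ' : Int) + (if c = ' ' then 1 else 0) := by
        have h1 : (a + 1).toNat = a.toNat + 1 := by omega
        rw [h1, List.take_add_one, List.getElem?_eq_getElem hlt, hget]
        by_cases hc : c = ' '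
        · simp [hc, List.count_append]
        · simp [hc, List.count_append]
      rw [PySem.List.enumerate_cons]
      simp only [List.foldl_cons]
      by_cases hc : c = ' '
      · subst hc
        rw [if_pos rfl]
        rw [ih (a + 1) d (cnt + 1) (by omega) hdrop'
              (fun k hk => by have := hkeys k hk; omega)
              (by rw [hcnt, htake]; simp; ring)]
        simp [specConv]
      · simp only [if_neg hc]
        have hval : PySem.List.pyGetD (1 :: tokTail full 1) a 0 = cnt := by
          have hlen : a.toNat < (1 :: tokTail full 1).length := by
            simp [tokTail_length]; omega
          rw [PySem.List.pyGetD_eq_getElem (1 :: tokTail full 1) 0 (by omega)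
                (by simp [tokTail_length]; omega),
              ← List.getD_eq_getElem (1 :: tokTail full 1) 0 hlen,
              tok_getD full 1 a.toNat (by omega), hcnt]
        have hcont : d.contains a = false := by
          rw [PySem.Dict.contains_eq_decide_mem_keys]
          simp only [decide_eq_false_iff_not]
          intro hmem
          exact absurd (hkeys a hmem) (lt_irrefl a)
        rw [hval]
        rw [ih (a + 1) (d.insert a cnt) cnt (by omega) hdrop'
              (fun k hk => by
                rcases (PySem.Dict.mem_keys_insert _ _ _ _).mp hk with h | h
                · omega
                · have := hkeys k h; omega)
              (by rw [hcnt, htake]; simp [hc])]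
        rw [PySem.Dict.items_insert_of_not_contains d cnt hcont]
        simp [specConv, hc]

-- ===== VERDICT (by name: the statement is the Claim_ definition above) =====
theorem convert_offsets_spec : Claim_equal_convert_offsets := by
  intro sentence _
  unfold Spec_convert_offsets convert_offsets convert_offsets_alt
  have htok : sentence.toList.foldl
      (fun acc c => acc ++ [PySem.List.pyGetD acc (-1) 0 + (if c = ' ' then 1 else 0)]) [1]
      = 1 :: tokTail sentence.toList 1 := by
    rw [b_tok_fold sentence.toList [1] (by simp)]
    simp
  rw [htok, PySem.Str.len_eq]
  rw [a_loop sentence.toList sentence.toList 0 PySem.Dict.empty 1 le_rfl (by simp) (by simp)]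
  rw [b_loop sentence.toList sentence.toList 0 PySem.Dict.empty 1 le_rfl (by simp) (by simp)
      (by simp)]
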